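-- pv_equiv track=rewrite | github.com/MatrixFounder/Universal-skills | skills/xlsx/scripts/xlsx_read/_tables.py | _tight_bbox
-- ===== SOURCE A (Python) =====
-- def _tight_bbox(
--     occupancy: list[list[bool]],
--     r_lo: int,
--     r_hi: int,
--     c_lo: int,
--     c_hi: int,
-- ) -> tuple[int, int, int, int] | None:
--     """Return the tightest occupied bbox inside the band, or None if empty.
--
--     Returned tuple is `(top, left, bottom, right)` in 0-based grid
--     coordinates relative to the occupancy matrix.
--     """
--     tr, tc, br, bc = None, None, None, None
--     for r in range(r_lo, r_hi + 1):
--         for c in range(c_lo, c_hi + 1):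
--             if occupancy[r][c]:
--                 if tr is None or r < tr:
--                     tr = r
--                 if br is None or r > br:
--                     br = r
--                 if tc is None or c < tc:
--                     tc = c
--                 if bc is None or c > bc:
--                     bc = c
--     if tr is None:
--         return None
--     return tr, tc, br, bc  # type: ignore[return-value]
-- ===== SOURCE B (Python) =====
-- def _tight_bbox(occupancy, r_lo, r_hi, c_lo, c_hi):
--     # Collect the occupied cells of the band once, then take four
--     # independent min/max reductions over rows and columns.
--     pts = [(r, c)
--            for r in range(r_lo, r_hi + 1)
--            for c in range(c_lo, c_hi + 1)
--            if occupancy[r][c]]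
--     if not pts:
--         return None
--     rows = [r for r, _ in pts]
--     cols = [c for _, c in pts]
--     return (min(rows), min(cols), max(rows), max(cols))
-- ===== Notes on version B (the rewrite author's own statement) =====
-- stated objective: simpler
-- what changed: B first materialises the list of occupied (r,c) cells of the band, then returns None on emptiness or four independent min/max reductions over the row and column lists, instead of A's interleaved four-accumulator None-seeded update loop.
import Mathlib
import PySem

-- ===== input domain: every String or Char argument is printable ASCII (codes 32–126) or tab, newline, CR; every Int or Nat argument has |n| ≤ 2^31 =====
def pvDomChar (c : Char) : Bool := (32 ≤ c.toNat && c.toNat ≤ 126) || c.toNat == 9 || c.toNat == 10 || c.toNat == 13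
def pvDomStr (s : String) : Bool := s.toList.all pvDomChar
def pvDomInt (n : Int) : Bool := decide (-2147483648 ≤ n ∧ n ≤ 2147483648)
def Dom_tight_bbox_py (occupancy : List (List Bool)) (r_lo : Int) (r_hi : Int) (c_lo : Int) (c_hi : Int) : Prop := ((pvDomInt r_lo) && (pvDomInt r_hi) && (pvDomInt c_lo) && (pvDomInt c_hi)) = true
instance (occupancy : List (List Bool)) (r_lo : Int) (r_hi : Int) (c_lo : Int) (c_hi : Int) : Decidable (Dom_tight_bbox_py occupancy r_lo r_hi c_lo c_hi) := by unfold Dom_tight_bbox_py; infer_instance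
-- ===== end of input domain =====

-- B replaces A's interleaved four-accumulator loop by collecting the occupied cells once
-- and taking four independent min/max reductions (objective: simpler decomposition).


-- ===== PORT A =====
-- state is (tr, tc, br, bc), each Option Int as in the Python
def tight_bbox_py (occupancy : List (List Bool)) (r_lo : Int) (r_hi : Int) (c_lo : Int) (c_hi : Int) : Option (Int × Int × Int × Int) :=
  let s := (PySem.List.pyRange r_lo (r_hi + 1) 1).foldl (fun s r =>
    (PySem.List.pyRange c_lo (c_hi + 1) 1).foldl (fun s c =>
      if PySem.List.pyGetD (PySem.List.pyGetD occupancy r []) c false then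
        let tr := match s.1 with | none => some r | some t => if r < t then some r else some t
        let br := match s.2.2.1 with | none => some r | some t => if r > t then some r else some t
        let tc := match s.2.1 with | none => some c | some t => if c < t then some c else some t
        let bc := match s.2.2.2 with | none => some c | some t => if c > t then some c else some t
        (tr, tc, br, bc)
      else s) s)
    ((none, none, none, none) : Option Int × Option Int × Option Int × Option Int)
  match s with
  | (some tr, some tc, some br, some bc) => some (tr, tc, br, bc)
  | _ => none

-- ===== PORT B =====
def tight_bbox_py_alt (occupancy : List (List Bool)) (r_lo : Int) (r_hi : Int) (c_lo : Int) (c_hi : Int) : Option (Int × Int × Int × Int) :=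
  let pts := (PySem.List.pyRange r_lo (r_hi + 1) 1).flatMap (fun r =>
    ((PySem.List.pyRange c_lo (c_hi + 1) 1).filter
        (fun c => PySem.List.pyGetD (PySem.List.pyGetD occupancy r []) c false)).map
      (fun c => (r, c)))
  match pts with
  | [] => none
  | p :: rest =>
    let rows := (p :: rest).map Prod.fst
    let cols := (p :: rest).map Prod.snd
    some (rows.tail.foldl min p.1, cols.tail.foldl min p.2,
          rows.tail.foldl max p.1, cols.tail.foldl max p.2)

-- ===== PRECONDITION & SPEC =====
-- Pre_ excludes exactly the inputs on which the Python A raises IndexError: whenever the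
-- inner column range is non-empty, every visited row index must be in range for the matrix
-- and every visited column index in range for that row.
def Pre_tight_bbox_py (occupancy : List (List Bool)) (r_lo : Int) (r_hi : Int) (c_lo : Int) (c_hi : Int) : Prop :=
  c_lo ≤ c_hi → r_lo ≤ r_hi →
    -(occupancy.length : Int) ≤ r_lo ∧ r_hi < (occupancy.length : Int) ∧
    ∀ p ∈ occupancy.zipIdx,
      ((r_lo ≤ (p.2 : Int) ∧ (p.2 : Int) ≤ r_hi) ∨
       (r_lo ≤ (p.2 : Int) - occupancy.length ∧ (p.2 : Int) - occupancy.length ≤ r_hi)) →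
      -(p.1.length : Int) ≤ c_lo ∧ c_hi < (p.1.length : Int)
instance (occupancy : List (List Bool)) (r_lo : Int) (r_hi : Int) (c_lo : Int) (c_hi : Int) : Decidable (Pre_tight_bbox_py occupancy r_lo r_hi c_lo c_hi) := by unfold Pre_tight_bbox_py; infer_instance

def pvWitness_tight_bbox_py : List (List Bool) × Int × Int × Int × Int := ([[true, false], [false, true]], 0, 1, 0, 1)

def Spec_tight_bbox_py (occupancy : List (List Bool)) (r_lo : Int) (r_hi : Int) (c_lo : Int) (c_hi : Int) (out : Option (Int × Int × Int × Int)) : Prop := out = tight_bbox_py_alt occupancy r_lo r_hi c_lo c_hi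
instance (occupancy : List (List Bool)) (r_lo : Int) (r_hi : Int) (c_lo : Int) (c_hi : Int) (out : Option (Int × Int × Int × Int)) : Decidable (Spec_tight_bbox_py occupancy r_lo r_hi c_lo c_hi out) := by unfold Spec_tight_bbox_py; infer_instance

-- ===== CLAIM (what is proved, stated in full; the proofs are below) =====
def Claim_equal_tight_bbox_py : Prop := ∀ (occupancy : List (List Bool)) (r_lo : Int) (r_hi : Int) (c_lo : Int) (c_hi : Int), Dom_tight_bbox_py occupancy r_lo r_hi c_lo c_hi → Pre_tight_bbox_py occupancy r_lo r_hi c_lo c_hi → Spec_tight_bbox_py occupancy r_lo r_hi c_lo c_hi (tight_bbox_py occupancy r_lo r_hi c_lo c_hi)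

-- ===== LEMMAS AND PROOFS =====

-- the four-component update A performs on an occupied cell, on the joint state
def pvMn (o : Option Int) (x : Int) : Option Int :=
  match o with | none => some x | some t => if x < t then some x else some t
def pvMx (o : Option Int) (x : Int) : Option Int :=
  match o with | none => some x | some t => if x > t then some x else some t
def pvStep (s : Option Int × Option Int × Option Int × Option Int) (p : Int × Int) :
    Option Int × Option Int × Option Int × Option Int :=
  (pvMn s.1 p.1, pvMn s.2.1 p.2, pvMx s.2.2.1 p.1, pvMx s.2.2.2 p.2)

theorem foldl_if_filter_map {α β σ : Type} (p : α → Bool) (g : α → β) (f : σ → β → σ) :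
    ∀ (l : List α) (s : σ),
      l.foldl (fun s x => if p x then f s (g x) else s) s = ((l.filter p).map g).foldl f s := by
  intro l
  induction l with
  | nil => intro s; rfl
  | cons x t ih =>
    intro s
    by_cases h : p x = true <;> simp [List.filter_cons, h, ih]

theorem foldl_flatMap' {α β σ : Type} (g : α → List β) (f : σ → β → σ) :
    ∀ (l : List α) (s : σ),
      (l.flatMap g).foldl f s = l.foldl (fun s x => (g x).foldl f s) s := by
  intro l
  induction l with
  | nil => intro s; rfl
  | cons x t ih => intro s; simp [List.flatMap_cons, List.foldl_append, ih]

theorem pvStep_components : ∀ (l : List (Int × Int)) (a b c d : Option Int),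
    l.foldl pvStep (a, b, c, d) =
      ((l.map Prod.fst).foldl pvMn a, (l.map Prod.snd).foldl pvMn b,
       (l.map Prod.fst).foldl pvMx c, (l.map Prod.snd).foldl pvMx d) := by
  intro l
  induction l with
  | nil => intro a b c d; rfl
  | cons x t ih => intro a b c d; simp [List.foldl_cons, pvStep, ih]

theorem pvMn_some : ∀ (l : List Int) (a : Int), l.foldl pvMn (some a) = some (l.foldl min a) := by
  intro l
  induction l with
  | nil => intro a; rfl
  | cons x t ih =>
    intro a
    have : pvMn (some a) x = some (min a x) := by
      simp only [pvMn]; split_ifs with h <;> (congr 1; omega)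
    simp [List.foldl_cons, this, ih]

theorem pvMx_some : ∀ (l : List Int) (a : Int), l.foldl pvMx (some a) = some (l.foldl max a) := by
  intro l
  induction l with
  | nil => intro a; rfl
  | cons x t ih =>
    intro a
    have : pvMx (some a) x = some (max a x) := by
      simp only [pvMx]; split_ifs with h <;> (congr 1; omega)
    simp [List.foldl_cons, this, ih]

-- ===== VERDICT (by name: the statement is the Claim_ definition above) =====
theorem tight_bbox_py_spec : Claim_equal_tight_bbox_py := by
  intro occupancy r_lo r_hi c_lo c_hi _ _
  unfold Spec_tight_bbox_py tight_bbox_py tight_bbox_py_alt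
  have hstep : ∀ (s : Option Int × Option Int × Option Int × Option Int) (r c : Int),
      (if PySem.List.pyGetD (PySem.List.pyGetD occupancy r []) c false then
        let tr := match s.1 with | none => some r | some t => if r < t then some r else some t
        let br := match s.2.2.1 with | none => some r | some t => if r > t then some r else some t
        let tc := match s.2.1 with | none => some c | some t => if c < t then some c else some t
        let bc := match s.2.2.2 with | none => some c | some t => if c > t then some c else some t
        (tr, tc, br, bc)
      else s)
      = (if PySem.List.pyGetD (PySem.List.pyGetD occupancy r []) c false then
          pvStep s (r, c) else s) := by
    intro s r c
    by_cases h : PySem.List.pyGetD (PySem.List.pyGetD occupancy r []) c false = true <;>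
      simp [h, pvStep, pvMn, pvMx]
  simp only [hstep]
  -- rewrite A's nested loop as a fold of pvStep over B's point list
  have hinner : ∀ (r : Int) (s : Option Int × Option Int × Option Int × Option Int),
      (PySem.List.pyRange c_lo (c_hi + 1) 1).foldl
        (fun s c => if PySem.List.pyGetD (PySem.List.pyGetD occupancy r []) c false then
          pvStep s (r, c) else s) s
      = (((PySem.List.pyRange c_lo (c_hi + 1) 1).filter
            (fun c => PySem.List.pyGetD (PySem.List.pyGetD occupancy r []) c false)).map
          (fun c => (r, c))).foldl pvStep s := by
    intro r s
    exact foldl_if_filter_map _ _ _ _ s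
  simp only [hinner]
  rw [← foldl_flatMap']
  set pts := (PySem.List.pyRange r_lo (r_hi + 1) 1).flatMap (fun r =>
    ((PySem.List.pyRange c_lo (c_hi + 1) 1).filter
        (fun c => PySem.List.pyGetD (PySem.List.pyGetD occupancy r []) c false)).map
      (fun c => (r, c))) with hpts
  cases pts with
  | nil => rfl
  | cons p rest =>
    have h1 : pvStep (none, none, none, none) p = (some p.1, some p.2, some p.1, some p.2) := by
      simp [pvStep, pvMn, pvMx]
    rw [List.foldl_cons, h1, pvStep_components, pvMn_some, pvMn_some, pvMx_some, pvMx_some]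
    simp
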